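-- pv_equiv track=rewrite | github.com/feiwangyuzhou/VMCL | pre_process.py | reidx
-- ===== SOURCE A (Python) =====
-- def reidx(tri):
--     tri_reidx = []
--     ent_reidx = dict()
--     entidx = 0
--     # ent_reidx['superent'] = entidx
--     # entidx += 1
--     # pdb.set_trace()
--     rel_reidx = dict()
--     relidx = 0
--     rel_reidx['self'] = relidx
--     relidx += 1
--     # rel_reidx['superrel'] = relidx
--     # relidx += 1
--     for h, r, t in tri:
--         if h not in ent_reidx.keys():
--             ent_reidx[h] = entidx
--             entidx += 1
--         if t not in ent_reidx.keys():
--             ent_reidx[t] = entidx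
--             entidx += 1
--         if r not in rel_reidx.keys():
--             rel_reidx[r] = relidx
--             relidx += 1
--         tri_reidx.append([ent_reidx[h], rel_reidx[r], ent_reidx[t]])
--     # pdb.set_trace()
--     for h in ent_reidx.keys():
--         tri_reidx.append([ent_reidx[h], rel_reidx['self'], ent_reidx[h]])
--
--     return tri_reidx, dict(rel_reidx), dict(ent_reidx)
-- ===== SOURCE B (Python) =====
-- def reidx(tri):
--     ents = list(dict.fromkeys(e for h, _, t in tri for e in (h, t)))
--     ent_reidx = {e: i for i, e in enumerate(ents)}
--     rels = list(dict.fromkeys(['self'] + [r for _, r, _ in tri]))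
--     rel_reidx = {r: i for i, r in enumerate(rels)}
--     tri_reidx = [[ent_reidx[h], rel_reidx[r], ent_reidx[t]] for h, r, t in tri]
--     tri_reidx += [[i, 0, i] for i in ent_reidx.values()]
--     return tri_reidx, rel_reidx, ent_reidx
-- ===== Notes on version B (the rewrite author's own statement) =====
-- stated objective: idiomatic
-- what changed: Replaces A's single stateful loop (two dicts grown with running counters and membership tests) by two dedup-then-enumerate passes: first-occurrence key lists built with dict.fromkeys, ids assigned by enumerate, then pure lookup comprehensions for the rows and self-loops.
import Mathlib
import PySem

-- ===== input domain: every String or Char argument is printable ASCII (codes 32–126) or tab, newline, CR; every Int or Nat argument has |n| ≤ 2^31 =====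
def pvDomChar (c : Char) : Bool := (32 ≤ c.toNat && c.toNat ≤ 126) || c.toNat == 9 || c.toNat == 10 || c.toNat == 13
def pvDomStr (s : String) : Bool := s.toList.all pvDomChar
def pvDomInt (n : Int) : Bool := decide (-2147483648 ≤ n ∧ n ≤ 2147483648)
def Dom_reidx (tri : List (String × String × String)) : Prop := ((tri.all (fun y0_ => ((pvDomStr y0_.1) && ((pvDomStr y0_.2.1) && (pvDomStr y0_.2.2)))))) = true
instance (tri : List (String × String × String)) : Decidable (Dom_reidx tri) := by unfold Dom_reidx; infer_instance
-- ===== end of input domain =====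

-- B re-indexes in two dedup-then-enumerate passes instead of A's single stateful loop with counters (objective: idiomatic); same return value.

-- ===== PORT A =====
-- the body of A's 'for h, r, t in tri' loop, as a fold step over the state (tri_reidx, ent_reidx, entidx, rel_reidx, relidx)
def reidxStep (s : List (List Int) × PySem.Dict String Int × Int × PySem.Dict String Int × Int)
    (x : String × String × String) :
    List (List Int) × PySem.Dict String Int × Int × PySem.Dict String Int × Int :=
  let (acc, ent, entidx, rel, relidx) := s
  let (ent, entidx) := if ent.contains x.1 then (ent, entidx) else (ent.insert x.1 entidx, entidx + 1)
  let (ent, entidx) := if ent.contains x.2.2 then (ent, entidx) else (ent.insert x.2.2 entidx, entidx + 1)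
  let (rel, relidx) := if rel.contains x.2.1 then (rel, relidx) else (rel.insert x.2.1 relidx, relidx + 1)
  -- ent_reidx[h] etc. are present here, so the total getD lookup is exact
  (acc ++ [[ent.getD x.1 0, rel.getD x.2.1 0, ent.getD x.2.2 0]], ent, entidx, rel, relidx)

def reidx (tri : List (String × String × String)) : List (List Int) × (List (String × Int)) × (List (String × Int)) :=
  let st := tri.foldl reidxStep ([], PySem.Dict.empty, 0, PySem.Dict.empty.insert "self" 0, 1)
  let (acc, ent, _, rel, _) := st
  let acc := ent.keys.foldl (fun a h => a ++ [[ent.getD h 0, rel.getD "self" 0, ent.getD h 0]]) acc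
  (acc, rel.items, ent.items)

-- ===== PORT B =====
-- the dict comprehension {e: i for i, e in enumerate(xs)} : sequential inserts of (element, index) pairs
def enumDict (xs : List String) : PySem.Dict String Int :=
  ((PySem.List.enumerate xs).map (fun p => (p.2, p.1))).foldl (fun d p => d.insert p.1 p.2) PySem.Dict.empty

def reidx_alt (tri : List (String × String × String)) : List (List Int) × (List (String × Int)) × (List (String × Int)) :=
  let ents := PySem.List.dedup (tri.flatMap (fun x => [x.1, x.2.2]))
  let entD := enumDict ents
  let rels := PySem.List.dedup ("self" :: tri.map (fun x => x.2.1))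
  let relD := enumDict rels
  -- ent_reidx[h] / rel_reidx[r] lookups: keys are present by construction, so the total getD is exact
  let body := tri.map (fun x => [entD.getD x.1 0, relD.getD x.2.1 0, entD.getD x.2.2 0])
  let loops := entD.values.map (fun i => [i, (0 : Int), i])
  (body ++ loops, relD.items, entD.items)

-- ===== PRECONDITION & SPEC =====
def Spec_reidx (tri : List (String × String × String)) (out : List (List Int) × (List (String × Int)) × (List (String × Int))) : Prop := out = reidx_alt tri
instance (tri : List (String × String × String)) (out : List (List Int) × (List (String × Int)) × (List (String × Int))) : Decidable (Spec_reidx tri out) := by unfold Spec_reidx; infer_instance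

-- ===== CLAIM (what is proved, stated in full; the proofs are below) =====
def Claim_equal_reidx : Prop := ∀ (tri : List (String × String × String)), Dom_reidx tri → Spec_reidx tri (reidx tri)

-- ===== LEMMAS AND PROOFS =====

-- the dict Dict.mk of (element, index) pairs, indices starting at s
def dEnum (s : Int) (xs : List String) : PySem.Dict String Int :=
  PySem.Dict.mk ((PySem.List.enumerate xs s).map (fun p => (p.2, p.1)))

theorem dEnum_cons (s : Int) (a : String) (xs : List String) :
    dEnum s (a :: xs) = PySem.Dict.mk ((a, s) :: ((PySem.List.enumerate xs (s+1)).map (fun p => (p.2, p.1)))) := by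
  simp [dEnum, PySem.List.enumerate_cons]

theorem keys_dEnum (s : Int) (xs : List String) : (dEnum s xs).keys = xs := by
  simp [dEnum, PySem.Dict.keys_mk, List.map_map, Function.comp_def, PySem.List.map_snd_enumerate]

theorem contains_dEnum (s : Int) (xs : List String) (x : String) :
    (dEnum s xs).contains x = decide (x ∈ xs) := by
  rw [PySem.Dict.contains_eq_decide_mem_keys, keys_dEnum]

theorem insert_dEnum (s : Int) (xs : List String) (x : String) (hx : x ∉ xs) :
    (dEnum s xs).insert x (s + xs.length) = dEnum s (xs ++ [x]) := by
  apply PySem.Dict.ext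
  rw [PySem.Dict.items_insert_of_not_contains]
  · simp [dEnum, PySem.List.enumerate_append, PySem.List.enumerate_cons]
  · simp [contains_dEnum, hx]

theorem get?_dEnum_append (s : Int) (xs ex : List String) (x : String) (hx : x ∈ xs) :
    (dEnum s (xs ++ ex)).get? x = (dEnum s xs).get? x := by
  induction xs generalizing s with
  | nil => cases hx
  | cons a l ih =>
    rw [List.cons_append, dEnum_cons, dEnum_cons, PySem.Dict.get?_mk_cons, PySem.Dict.get?_mk_cons]
    by_cases hax : a = x
    · simp [hax]
    · have hxl : x ∈ l := by cases hx with
        | head => exact absurd rfl hax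
        | tail _ h => exact h
      simp only [beq_iff_eq, hax, if_false]
      exact ih (s+1) hxl

theorem getD_dEnum_append (s : Int) (xs ex : List String) (x : String) (hx : x ∈ xs) :
    (dEnum s (xs ++ ex)).getD x 0 = (dEnum s xs).getD x 0 := by
  rw [PySem.Dict.getD_eq_get?_getD, PySem.Dict.getD_eq_get?_getD, get?_dEnum_append s xs ex x hx]

theorem getD_dEnum_update (s : Int) (xs l : List String) (x : String) (hx : x ∈ xs) :
    (dEnum s (PySem.Set.update xs l)).getD x 0 = (dEnum s xs).getD x 0 := by
  rw [PySem.Set.update_eq_append_filter, getD_dEnum_append s xs _ x hx]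

-- A's "if absent then insert at the running counter" step equals Set.add on the key list
theorem stepEnt0 (xs : List String) (x : String) :
    (if (dEnum 0 xs).contains x = true then (dEnum 0 xs, (xs.length : Int))
     else ((dEnum 0 xs).insert x (xs.length : Int), (xs.length : Int) + 1))
    = (dEnum 0 (PySem.Set.add xs x), ((PySem.Set.add xs x).length : Int)) := by
  by_cases h : x ∈ xs
  · simp [contains_dEnum, h]
  · rw [contains_dEnum]
    simp only [h, decide_false]
    have hi := insert_dEnum 0 xs x h
    rw [zero_add] at hi
    rw [hi, PySem.Set.add_of_not_mem h]
    simp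

-- index map: looking every element of a nodup list up in its own enumeration dict gives the indices
theorem map_getD_dEnum (s : Int) (xs : List String) (h : xs.Nodup) :
    xs.map (fun x => (dEnum s xs).getD x 0) = (PySem.List.enumerate xs s).map (fun p => p.1) := by
  induction xs generalizing s with
  | nil => simp
  | cons a l ih =>
    have hal : a ∉ l := (List.nodup_cons.mp h).1
    have hl : l.Nodup := (List.nodup_cons.mp h).2
    rw [List.map_cons, PySem.List.enumerate_cons, List.map_cons]
    congr 1
    · rw [dEnum_cons, PySem.Dict.getD_eq_get?_getD, PySem.Dict.get?_mk_cons]; simp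
    · rw [← ih (s+1) hl]
      apply List.map_congr_left
      intro x hx
      have hxa : ¬ (a = x) := fun he => hal (he ▸ hx)
      rw [dEnum_cons, PySem.Dict.getD_eq_get?_getD, PySem.Dict.get?_mk_cons]
      simp only [beq_iff_eq, hxa, if_false]
      rfl

-- the main loop invariant for A's fold
theorem loopA_inv (tri : List (String × String × String)) (acc : List (List Int)) (es ss : List String) :
    tri.foldl reidxStep (acc, dEnum 0 es, (es.length : Int), dEnum 0 ss, (ss.length : Int))
    = (acc ++ tri.map (fun x =>
          [(dEnum 0 (PySem.Set.update es (tri.flatMap (fun x => [x.1, x.2.2])))).getD x.1 0,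
           (dEnum 0 (PySem.Set.update ss (tri.map (fun x => x.2.1)))).getD x.2.1 0,
           (dEnum 0 (PySem.Set.update es (tri.flatMap (fun x => [x.1, x.2.2])))).getD x.2.2 0]),
       dEnum 0 (PySem.Set.update es (tri.flatMap (fun x => [x.1, x.2.2]))),
       ((PySem.Set.update es (tri.flatMap (fun x => [x.1, x.2.2]))).length : Int),
       dEnum 0 (PySem.Set.update ss (tri.map (fun x => x.2.1))),
       ((PySem.Set.update ss (tri.map (fun x => x.2.1))).length : Int)) := by
  induction tri generalizing acc es ss with
  | nil => simp [PySem.Set.update]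
  | cons x rest ih =>
    have hstep : reidxStep (acc, dEnum 0 es, (es.length : Int), dEnum 0 ss, (ss.length : Int)) x
        = (acc ++ [[(dEnum 0 (PySem.Set.add (PySem.Set.add es x.1) x.2.2)).getD x.1 0,
                    (dEnum 0 (PySem.Set.add ss x.2.1)).getD x.2.1 0,
                    (dEnum 0 (PySem.Set.add (PySem.Set.add es x.1) x.2.2)).getD x.2.2 0]],
           dEnum 0 (PySem.Set.add (PySem.Set.add es x.1) x.2.2),
           ((PySem.Set.add (PySem.Set.add es x.1) x.2.2).length : Int),
           dEnum 0 (PySem.Set.add ss x.2.1),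
           ((PySem.Set.add ss x.2.1).length : Int)) := by
      simp only [reidxStep, stepEnt0]
    rw [List.foldl_cons, hstep, ih]
    simp only [List.flatMap_cons, List.map_cons, List.cons_append, List.nil_append,
      PySem.Set.update_cons, List.append_assoc]
    have h1 : x.1 ∈ PySem.Set.add (PySem.Set.add es x.1) x.2.2 := by
      simp [PySem.Set.mem_add]
    have h2 : x.2.1 ∈ PySem.Set.add ss x.2.1 := by simp [PySem.Set.mem_add]
    have h3 : x.2.2 ∈ PySem.Set.add (PySem.Set.add es x.1) x.2.2 := by
      simp [PySem.Set.mem_add]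
    rw [getD_dEnum_update 0 _ _ _ h1, getD_dEnum_update 0 _ _ _ h2, getD_dEnum_update 0 _ _ _ h3]

theorem foldl_append_map (l : List String) (acc : List (List Int)) (g : String → List Int) :
    l.foldl (fun a h => a ++ [g h]) acc = acc ++ l.map g := by
  induction l generalizing acc with
  | nil => simp
  | cons a l ih => simp [ih, List.append_assoc]

-- B's dict comprehension over nodup keys is dEnum
theorem enumDict_eq_dEnum (xs : List String) (h : xs.Nodup) : enumDict xs = dEnum 0 xs := by
  apply PySem.Dict.ext
  unfold enumDict
  rw [PySem.Dict.items_foldl_insert_fresh]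
  · simp [dEnum, PySem.Dict.empty, Function.comp_def]
  · intro a _; exact PySem.Dict.contains_empty _
  · simpa [List.map_map, Function.comp_def, PySem.List.map_snd_enumerate]

-- the appended self-loop rows, written via values of the enumeration dict
theorem selfloops_eq (l : List String) (h : l.Nodup) :
    l.map (fun x => [(dEnum 0 l).getD x 0, (0 : Int), (dEnum 0 l).getD x 0])
    = (dEnum 0 l).values.map (fun i => [i, (0 : Int), i]) := by
  have hf := map_getD_dEnum 0 l h
  have h1 : l.map (fun x => [(dEnum 0 l).getD x 0, (0 : Int), (dEnum 0 l).getD x 0])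
      = (l.map (fun x => (dEnum 0 l).getD x 0)).map (fun i => [i, (0 : Int), i]) := by
    rw [List.map_map]; rfl
  have h2 : (dEnum 0 l).values = (PySem.List.enumerate l 0).map (fun p => p.1) := by
    simp [dEnum, List.map_map, Function.comp_def]
  rw [h1, hf, h2]

-- ===== VERDICT (by name: the statement is the Claim_ definition above) =====
theorem reidx_spec : Claim_equal_reidx := by
  unfold Claim_equal_reidx
  intro tri _
  unfold Spec_reidx reidx reidx_alt
  have hinit : (PySem.Dict.empty : PySem.Dict String Int).insert "self" 0 = dEnum 0 ["self"] := by
    apply PySem.Dict.ext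
    simp [dEnum, PySem.Dict.empty, PySem.List.enumerate_cons, PySem.Dict.items_insert_of_not_contains]
  have h0 : (PySem.Dict.empty : PySem.Dict String Int) = dEnum 0 [] := rfl
  have hstart := loopA_inv tri [] [] ["self"]
  norm_num at hstart
  rw [hinit, h0, hstart]
  have hadd : PySem.Set.add ([] : List String) "self" = ["self"] := rfl
  have hents : PySem.List.dedup (tri.flatMap (fun x => [x.1, x.2.2]))
      = PySem.Set.update [] (tri.flatMap (fun x => [x.1, x.2.2])) := by
    rw [PySem.List.dedup_eq_ofList, PySem.Set.update_nil_left]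
  have hrels : PySem.List.dedup ("self" :: tri.map (fun x => x.2.1))
      = PySem.Set.update ["self"] (tri.map (fun x => x.2.1)) := by
    rw [PySem.List.dedup_eq_ofList, ← PySem.Set.update_nil_left, PySem.Set.update_cons, hadd]
  have hESnd : (PySem.Set.update [] (tri.flatMap (fun x => [x.1, x.2.2]))).Nodup := by
    rw [PySem.Set.update_nil_left]; exact PySem.Set.nodup_ofList _
  have hSSnd : (PySem.Set.update ["self"] (tri.map (fun x => x.2.1))).Nodup := by
    rw [← hrels, PySem.List.dedup_eq_ofList]; exact PySem.Set.nodup_ofList _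
  simp only [hents, hrels, enumDict_eq_dEnum _ hESnd, enumDict_eq_dEnum _ hSSnd]
  rw [keys_dEnum, foldl_append_map]
  have hself : (dEnum 0 (PySem.Set.update ["self"] (tri.map (fun x => x.2.1)))).getD "self" 0 = 0 := by
    rw [getD_dEnum_update 0 ["self"] _ "self" (by simp)]
    rfl
  simp only [hself]
  rw [selfloops_eq _ hESnd]
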